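-- pv_equiv track=rewrite | github.com/FDPS/PIKG | src/mncore2_vsm_gen/generate_core_instlist.py | imm_divide
-- ===== SOURCE A (Python) =====
-- def imm_divide(instlist):
--     imm_instlist = []
--     res_instlist = []
--     for lno, (op, ili, oli) in enumerate(instlist):
--         if "imm" in op:
--             canDivide = True
--             for i in range(lno+1,len(instlist)):
--                 _, _, oli_ = instlist[i]
--                 if oli_ == oli:
--                     canDivide = False
--             if canDivide:
--                 imm_instlist.append( [op, ili, oli] )
--                 continue
--         res_instlist.append( [op, ili, oli] )
--
--     return res_instlist, imm_instlist
-- ===== SOURCE B (Python) =====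
-- def imm_divide(instlist):
--     # One reverse pass with a set of outputs seen later: O(n) instead of A's O(n^2).
--     res_instlist = []
--     imm_instlist = []
--     seen = set()
--     for op, ili, oli in reversed(instlist):
--         if "imm" in op and oli not in seen:
--             imm_instlist.append([op, ili, oli])
--         else:
--             res_instlist.append([op, ili, oli])
--         seen.add(oli)
--     res_instlist.reverse()
--     imm_instlist.reverse()
--     return res_instlist, imm_instlist
-- ===== Notes on version B (the rewrite author's own statement) =====
-- stated objective: faster
-- what changed: Replaces A's quadratic inner rescan of the remaining instructions per 'imm' instruction with a single reverse pass that maintains a set of output lists seen later.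
import Mathlib
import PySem

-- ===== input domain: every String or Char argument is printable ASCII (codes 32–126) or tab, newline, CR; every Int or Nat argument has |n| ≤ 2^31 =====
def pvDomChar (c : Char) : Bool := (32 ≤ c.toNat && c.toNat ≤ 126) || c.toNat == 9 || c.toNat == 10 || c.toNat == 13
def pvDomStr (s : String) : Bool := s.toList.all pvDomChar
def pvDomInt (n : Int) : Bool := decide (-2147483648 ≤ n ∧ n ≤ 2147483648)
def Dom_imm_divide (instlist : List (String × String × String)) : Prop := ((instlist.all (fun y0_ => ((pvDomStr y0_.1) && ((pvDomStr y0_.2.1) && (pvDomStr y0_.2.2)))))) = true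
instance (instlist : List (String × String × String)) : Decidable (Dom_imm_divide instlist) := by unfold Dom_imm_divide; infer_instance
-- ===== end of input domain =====

-- B replaces A's quadratic per-'imm' rescan of later instructions with one reverse pass
-- maintaining a set of output lists seen later (objective: faster).


-- ===== PORT A =====
-- loop body of A's for-loop (state = (imm_instlist, res_instlist))
def immStepA (instlist : List (String × String × String))
    (st : List (List String) × List (List String)) (p : Int × String × String × String) :
    List (List String) × List (List String) :=
  -- st = (imm_instlist, res_instlist); p = (lno, (op, ili, oli))
  if PySem.Str.isIn "imm" p.2.1 then
    let canDivide := (PySem.List.pyRange (p.1 + 1) (instlist.length : Int) 1).foldl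
      (fun cd i =>
        let oli_ := (PySem.List.pyGetD instlist i ("", "", "")).2.2
        if oli_ == p.2.2.2 then false else cd) true
    if canDivide then (st.1 ++ [[p.2.1, p.2.2.1, p.2.2.2]], st.2)
    else (st.1, st.2 ++ [[p.2.1, p.2.2.1, p.2.2.2]])
  else (st.1, st.2 ++ [[p.2.1, p.2.2.1, p.2.2.2]])

def imm_divide (instlist : List (String × String × String)) :
    List (List String) × List (List String) :=
  let st := (PySem.List.enumerate instlist).foldl (immStepA instlist) ([], [])
  (st.2, st.1)

-- ===== PORT B =====
-- loop body of B's for-loop over reversed(instlist) (state = (res, imm, seen))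
def immStepB (st : List (List String) × List (List String) × PySem.Set String)
    (t : String × String × String) :
    List (List String) × List (List String) × PySem.Set String :=
  -- st = (res, imm, seen); t = (op, ili, oli)
  let st' :=
    if PySem.Str.isIn "imm" t.1 && !(PySem.Set.contains st.2.2 t.2.2) then
      (st.1, st.2.1 ++ [[t.1, t.2.1, t.2.2]], st.2.2)
    else
      (st.1 ++ [[t.1, t.2.1, t.2.2]], st.2.1, st.2.2)
  (st'.1, st'.2.1, PySem.Set.add st'.2.2 t.2.2)

def imm_divide_alt (instlist : List (String × String × String)) :
    List (List String) × List (List String) :=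
  let st := instlist.reverse.foldl immStepB ([], [], PySem.Set.empty)
  (st.1.reverse, st.2.1.reverse)

-- ===== PRECONDITION & SPEC =====
def Spec_imm_divide (instlist : List (String × String × String)) (out : List (List String) × List (List String)) : Prop := out = imm_divide_alt instlist
instance (instlist : List (String × String × String)) (out : List (List String) × List (List String)) : Decidable (Spec_imm_divide instlist out) := by unfold Spec_imm_divide; infer_instance

-- ===== CLAIM (what is proved, stated in full; the proofs are below) =====
def Claim_equal_imm_divide : Prop := ∀ (instlist : List (String × String × String)), Dom_imm_divide instlist → Spec_imm_divide instlist (imm_divide instlist)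

-- ===== LEMMAS AND PROOFS =====

-- Common reference function: element goes to imm iff "imm" in op and no later element writes oli.
def immCore : List (String × String × String) → List (List String) × List (List String)
  | [] => ([], [])
  | (op, ili, oli) :: tl =>
    let r := immCore tl
    if PySem.Str.isIn "imm" op && tl.all (fun t => !(t.2.2 == oli)) then
      (r.1, [op, ili, oli] :: r.2)
    else
      ([op, ili, oli] :: r.1, r.2)

-- the set B has accumulated after processing a suffix (back to front)
def seenOf : List (String × String × String) → PySem.Set String
  | [] => PySem.Set.empty
  | t :: tl => PySem.Set.add (seenOf tl) t.2.2

theorem mem_seenOf (l : List (String × String × String)) (y : String) :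
    y ∈ seenOf l ↔ y ∈ l.map (·.2.2) := by
  induction l with
  | nil => simp [seenOf, PySem.Set.empty]
  | cons x tl ih =>
      simp only [seenOf, PySem.Set.mem_add, ih, List.map_cons, List.mem_cons]
      tauto

theorem contains_seenOf (l : List (String × String × String)) (y : String) :
    PySem.Set.contains (seenOf l) y = !(l.all (fun t => !(t.2.2 == y))) := by
  rw [Bool.eq_iff_iff, PySem.Set.contains_iff, mem_seenOf]
  simp

-- B equals immCore
theorem foldr_B (l : List (String × String × String)) :
    l.foldr (fun x acc => immStepB acc x) ([], [], PySem.Set.empty)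
      = ((immCore l).1.reverse, (immCore l).2.reverse, seenOf l) := by
  induction l with
  | nil => simp [immCore, seenOf]
  | cons x tl ih =>
      obtain ⟨op, ili, oli⟩ := x
      rw [List.foldr_cons, ih]
      simp only [immStepB, contains_seenOf, Bool.not_not, immCore, seenOf]
      split_ifs <;> simp_all

theorem alt_eq_core (l : List (String × String × String)) :
    imm_divide_alt l = immCore l := by
  unfold imm_divide_alt
  rw [List.foldl_reverse, foldr_B]
  simp

-- inner fold of A: a fold of "if hit then false" computes init && all-miss
theorem foldl_hit (l : List (String × String × String)) (oli : String) (cd : Bool) :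
    l.foldl (fun cd t => if t.2.2 == oli then false else cd) cd
      = (cd && l.all (fun t => !(t.2.2 == oli))) := by
  induction l generalizing cd with
  | nil => simp
  | cons x tl ih =>
      simp only [List.foldl_cons, List.all_cons, ih]
      by_cases h : (x.2.2 == oli) = true <;> simp [h]

theorem drop_len_succ {α : Type} (pre : List α) (y : α) (tl : List α) :
    (pre ++ y :: tl).drop (pre.length + 1) = tl := by
  induction pre with
  | nil => simp
  | cons a pre ih => simp [ih]

-- the step of A at index pre.length inside pre ++ x :: tl, via core's no-later-write condition
theorem stepA_eq (pre tl : List (String × String × String)) (op ili oli : String)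
    (imm res : List (List String)) :
    immStepA (pre ++ (op, ili, oli) :: tl) (imm, res) ((pre.length : Int), (op, ili, oli))
      = (if PySem.Str.isIn "imm" op && tl.all (fun t => !(t.2.2 == oli)) then
          (imm ++ [[op, ili, oli]], res)
        else (imm, res ++ [[op, ili, oli]])) := by
  simp only [immStepA]
  have h0 : (0 : Int) ≤ (pre.length : Int) + 1 := by positivity
  rw [PySem.List.foldl_pyRange_pyGetD' (pre ++ (op, ili, oli) :: tl) ("", "", "")
        (fun cd t => if t.2.2 == oli then false else cd) true h0]
  have ht : (((pre.length : Int) + 1)).toNat = pre.length + 1 := by omega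
  rw [ht, drop_len_succ, foldl_hit]
  split_ifs <;> simp_all
  · obtain ⟨a, b, hm⟩ := ‹∃ x x_1, (x, x_1, oli) ∈ tl›
    exact ‹∀ (a a_1 b : String), (a, a_1, b) ∈ tl → ¬b = oli› a b oli hm rfl
  · obtain ⟨a, b, hm⟩ := ‹∃ x x_1, (x, x_1, oli) ∈ tl›
    exact ‹∀ (a a_1 b : String), (a, a_1, b) ∈ tl → ¬b = oli› a b oli hm rfl

-- outer fold of A, generalized over the processed prefix
theorem foldl_A (suf : List (String × String × String)) :
    ∀ (pre : List (String × String × String)) (imm res : List (List String)),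
    (PySem.List.enumerate suf (pre.length : Int)).foldl (immStepA (pre ++ suf)) (imm, res)
      = (imm ++ (immCore suf).2, res ++ (immCore suf).1) := by
  induction suf with
  | nil => intro pre imm res; simp [PySem.List.enumerate_nil, immCore]
  | cons x tl ih =>
      intro pre imm res
      obtain ⟨op, ili, oli⟩ := x
      rw [PySem.List.enumerate_cons, List.foldl_cons, stepA_eq]
      have hpre : pre ++ (op, ili, oli) :: tl = (pre ++ [(op, ili, oli)]) ++ tl := by simp
      have hlen : (pre.length : Int) + 1 = (((pre ++ [(op, ili, oli)]).length : Int)) := by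
        simp
      by_cases h : (PySem.Str.isIn "imm" op && tl.all (fun t => !(t.2.2 == oli))) = true
      · rw [if_pos h, hpre, hlen, ih]
        simp only [immCore]
        rw [if_pos h]
        simp
      · rw [if_neg h, hpre, hlen, ih]
        simp only [immCore]
        rw [if_neg h]
        simp

theorem a_eq_core (l : List (String × String × String)) :
    imm_divide l = ((immCore l).1, (immCore l).2) := by
  have h := foldl_A l [] [] []
  simp only [List.nil_append, List.length_nil, Int.natCast_zero] at h
  unfold imm_divide
  rw [h]

-- ===== VERDICT (by name: the statement is the Claim_ definition above) =====
theorem imm_divide_spec : Claim_equal_imm_divide := by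
  intro instlist _
  unfold Spec_imm_divide
  rw [alt_eq_core, a_eq_core]
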